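-- pv_equiv track=rewrite | github.com/eggbertgjk/vault-risk-framework | calibration/categorize.py | categorize_exploit
-- ===== SOURCE A (Python) =====
-- from typing import Dict, Tuple
--
-- PRIMITIVE_KEYWORDS: Dict[str, list] = {
--     "CONTRACT": [
--         "reentrancy", "access control", "logic error", "flash loan",
--         "flashloan", "overflow", "underflow", "rounding", "protocol logic",
--         "smart contract", "infinite mint", "integer", "input validation",
--         "front-end", "uninitialized", "delegate", "self-destruct",
--         "constructor", "signature", "replay", "compiler", "language",
--     ],
--     "OPERATIONAL": [
--         "key compromise", "private key", "bridge", "frontend", "dns",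
--         "infrastructure", "social engineering", "insider", "supply chain",
--         "compromised", "phishing", "stolen key", "hot wallet", "cold wallet",
--         "internal", "employee", "credential",
--     ],
--     "ORACLE": [
--         "oracle manipulation", "price feed", "stale price", "twap",
--         "oracle failure", "price oracle", "oracle", "price manipulation",
--     ],
--     "GOVERNANCE": [
--         "rug pull", "rugpull", "admin key", "malicious upgrade",
--         "governance attack", "backdoor", "owner",
--     ],
-- }
--
-- def categorize_exploit(technique: str, target_type: str = "") -> str:
--     """Assign a single exploit to its root-cause primitive class.
--
--     Args:
--         technique: Free-text technique description from DeFiLlama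
--         target_type: Optional target type field
--
--     Returns:
--         One of: CONTRACT, OPERATIONAL, ORACLE, GOVERNANCE, UNCATEGORIZED
--     """
--     text = f"{technique} {target_type}".lower()
--
--     # Check GOVERNANCE first (rug pulls are distinctive)
--     for kw in PRIMITIVE_KEYWORDS["GOVERNANCE"]:
--         if kw in text:
--             return "GOVERNANCE"
--
--     # ORACLE before CONTRACT (oracle manipulation is specific)
--     for kw in PRIMITIVE_KEYWORDS["ORACLE"]:
--         if kw in text:
--             return "ORACLE"
--
--     # OPERATIONAL (key compromise, bridge)
--     for kw in PRIMITIVE_KEYWORDS["OPERATIONAL"]: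
--         if kw in text:
--             return "OPERATIONAL"
--
--     # CONTRACT (default for code-level exploits)
--     for kw in PRIMITIVE_KEYWORDS["CONTRACT"]:
--         if kw in text:
--             return "CONTRACT"
--
--     # Fallback: most uncategorized exploits are contract-level
--     return "CONTRACT"
-- ===== SOURCE B (Python) =====
-- from typing import Dict
--
-- PRIMITIVE_KEYWORDS: Dict[str, list] = {
--     "CONTRACT": [
--         "reentrancy", "access control", "logic error", "flash loan",
--         "flashloan", "overflow", "underflow", "rounding", "protocol logic",
--         "smart contract", "infinite mint", "integer", "input validation",
--         "front-end", "uninitialized", "delegate", "self-destruct",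
--         "constructor", "signature", "replay", "compiler", "language",
--     ],
--     "OPERATIONAL": [
--         "key compromise", "private key", "bridge", "frontend", "dns",
--         "infrastructure", "social engineering", "insider", "supply chain",
--         "compromised", "phishing", "stolen key", "hot wallet", "cold wallet",
--         "internal", "employee", "credential",
--     ],
--     "ORACLE": [
--         "oracle manipulation", "price feed", "stale price", "twap",
--         "oracle failure", "price oracle", "oracle", "price manipulation",
--     ],
--     "GOVERNANCE": [
--         "rug pull", "rugpull", "admin key", "malicious upgrade",
--         "governance attack", "backdoor", "owner",
--     ],
-- }
--
-- def categorize_exploit(technique: str, target_type: str = "") -> str: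
--     text = f"{technique} {target_type}".lower()
--     # Pass 1: which categories have any keyword occurring in the text.
--     hits = {cat for cat, kws in PRIMITIVE_KEYWORDS.items()
--             if any(kw in text for kw in kws)}
--     # Pass 2: pick the highest-priority hit; fallback is CONTRACT anyway.
--     for cat in ["GOVERNANCE", "ORACLE", "OPERATIONAL", "CONTRACT"]:
--         if cat in hits:
--             return cat
--     return "CONTRACT"
-- ===== Notes on version B (the rewrite author's own statement) =====
-- stated objective: alternative
-- what changed: B separates matching from priority: one pass builds the set of categories whose keyword list hits the text, then a priority list picks the first hit (fallback CONTRACT), instead of A's four hard-coded short-circuiting keyword loops with early returns.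
import Mathlib
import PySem

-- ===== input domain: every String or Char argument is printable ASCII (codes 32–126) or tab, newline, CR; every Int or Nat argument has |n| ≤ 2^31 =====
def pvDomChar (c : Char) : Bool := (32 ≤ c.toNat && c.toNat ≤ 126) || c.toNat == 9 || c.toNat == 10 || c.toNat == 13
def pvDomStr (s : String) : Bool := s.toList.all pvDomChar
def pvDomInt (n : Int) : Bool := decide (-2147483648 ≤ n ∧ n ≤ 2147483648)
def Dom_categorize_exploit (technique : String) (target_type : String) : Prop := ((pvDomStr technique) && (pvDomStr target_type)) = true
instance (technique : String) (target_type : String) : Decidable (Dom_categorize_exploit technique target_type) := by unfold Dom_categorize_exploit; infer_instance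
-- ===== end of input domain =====

-- B builds the set of matching categories in one pass over the keyword dict and then
-- selects the first hit from an explicit priority list, instead of A's four
-- hard-coded short-circuiting keyword loops with early returns (objective: alternative).

-- ===== PORT A =====
def PRIMITIVE_KEYWORDS : PySem.Dict String (List String) := PySem.Dict.ofList
  [ ("CONTRACT",
      ["reentrancy", "access control", "logic error", "flash loan",
       "flashloan", "overflow", "underflow", "rounding", "protocol logic",
       "smart contract", "infinite mint", "integer", "input validation",
       "front-end", "uninitialized", "delegate", "self-destruct",
       "constructor", "signature", "replay", "compiler", "language"]),
    ("OPERATIONAL",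
      ["key compromise", "private key", "bridge", "frontend", "dns",
       "infrastructure", "social engineering", "insider", "supply chain",
       "compromised", "phishing", "stolen key", "hot wallet", "cold wallet",
       "internal", "employee", "credential"]),
    ("ORACLE",
      ["oracle manipulation", "price feed", "stale price", "twap",
       "oracle failure", "price oracle", "oracle", "price manipulation"]),
    ("GOVERNANCE",
      ["rug pull", "rugpull", "admin key", "malicious upgrade",
       "governance attack", "backdoor", "owner"]) ]

-- A: text = f"{technique} {target_type}".lower(); four keyword loops in priority
-- order, each returning its category on the first substring hit; fallback "CONTRACT".
def categorize_exploit (technique : String) (target_type : String) : String :=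
  let text := PySem.Str.lower (PySem.Str.join " " [technique, target_type])
  if (PRIMITIVE_KEYWORDS.getD "GOVERNANCE" []).any (fun kw => PySem.Str.isIn kw text) then "GOVERNANCE"
  else if (PRIMITIVE_KEYWORDS.getD "ORACLE" []).any (fun kw => PySem.Str.isIn kw text) then "ORACLE"
  else if (PRIMITIVE_KEYWORDS.getD "OPERATIONAL" []).any (fun kw => PySem.Str.isIn kw text) then "OPERATIONAL"
  else if (PRIMITIVE_KEYWORDS.getD "CONTRACT" []).any (fun kw => PySem.Str.isIn kw text) then "CONTRACT"
  else "CONTRACT"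

-- ===== PORT B =====
-- B: one pass over the dict's items builds the set of hit categories, then the
-- first priority-list member contained in that set is returned (fallback "CONTRACT").
def categorize_exploit_alt (technique : String) (target_type : String) : String :=
  let text := PySem.Str.lower (PySem.Str.join " " [technique, target_type])
  let hits : PySem.Set String := PySem.Set.ofList
    ((PRIMITIVE_KEYWORDS.items.filter (fun p => p.2.any (fun kw => PySem.Str.isIn kw text))).map (·.1))
  match (["GOVERNANCE", "ORACLE", "OPERATIONAL", "CONTRACT"] : List String).find?
          (fun c => PySem.Set.contains hits c) with
  | some c => c
  | none => "CONTRACT"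

-- ===== PRECONDITION & SPEC =====
def Spec_categorize_exploit (technique : String) (target_type : String) (out : String) : Prop := out = categorize_exploit_alt technique target_type
instance (technique : String) (target_type : String) (out : String) : Decidable (Spec_categorize_exploit technique target_type out) := by unfold Spec_categorize_exploit; infer_instance

-- ===== CLAIM (what is proved, stated in full; the proofs are below) =====
def Claim_equal_categorize_exploit : Prop := ∀ (technique : String) (target_type : String), Dom_categorize_exploit technique target_type → Spec_categorize_exploit technique target_type (categorize_exploit technique target_type)

-- ===== LEMMAS AND PROOFS =====

-- ===== VERDICT (by name: the statement is the Claim_ definition above) =====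
-- Core shape of both programs over abstract keyword lists: A's priority if-chain
-- equals B's ofList/filter/find? selection, for any hit test f.
theorem pv_core (f : String → Bool) (gl ol pl cl : List String) :
    (if gl.any f then "GOVERNANCE"
     else if ol.any f then "ORACLE"
     else if pl.any f then "OPERATIONAL"
     else if cl.any f then "CONTRACT"
     else "CONTRACT")
    = (match (["GOVERNANCE", "ORACLE", "OPERATIONAL", "CONTRACT"] : List String).find?
          (fun c => PySem.Set.contains (PySem.Set.ofList
            (((([("CONTRACT", cl), ("OPERATIONAL", pl), ("ORACLE", ol), ("GOVERNANCE", gl)] :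
                List (String × List String))).filter (fun p => p.2.any f)).map (·.1))) c) with
       | some c => c
       | none => "CONTRACT") := by
  by_cases hG : gl.any f <;> by_cases hO : ol.any f <;>
  by_cases hP : pl.any f <;> by_cases hC : cl.any f <;>
  simp [hG, hO, hP, hC, List.filter, List.find?, PySem.Set.ofList, PySem.Set.contains,
        PySem.Set.add, List.foldl]

theorem categorize_exploit_spec : Claim_equal_categorize_exploit := by
  intro technique target_type _
  unfold Spec_categorize_exploit categorize_exploit categorize_exploit_alt
  simp only []
  generalize (fun kw => PySem.Str.isIn kw (PySem.Str.lower (PySem.Str.join " " [technique, target_type]))) = f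
  exact pv_core f
    ["rug pull", "rugpull", "admin key", "malicious upgrade",
     "governance attack", "backdoor", "owner"]
    ["oracle manipulation", "price feed", "stale price", "twap",
     "oracle failure", "price oracle", "oracle", "price manipulation"]
    ["key compromise", "private key", "bridge", "frontend", "dns",
     "infrastructure", "social engineering", "insider", "supply chain",
     "compromised", "phishing", "stolen key", "hot wallet", "cold wallet",
     "internal", "employee", "credential"]
    ["reentrancy", "access control", "logic error", "flash loan",
     "flashloan", "overflow", "underflow", "rounding", "protocol logic",
     "smart contract", "infinite mint", "integer", "input validation",
     "front-end", "uninitialized", "delegate", "self-destruct",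
     "constructor", "signature", "replay", "compiler", "language"]
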